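-- pv_equiv track=rewrite | github.com/zhangtrex/2017A2CS2 | Ch25/recursion2.py | groupSumClump
-- ===== SOURCE A (Python) =====
-- def groupSumClump(s,x,t):
--     if t==0:
--         return True
--     if s==len(x):
--         return False
--     n=1
--     while s+n<len(x) and x[s]==x[s+n]:
--         n+=1
--     return groupSumClump(s+n,x,t) or groupSumClump(s+n,x,t-n*x[s])
-- ===== SOURCE B (Python) =====
-- def groupSumClump(s, x, t):
--     sums = {0}
--     ys = x[s:]
--     while ys:
--         n = 1
--         while n < len(ys) and ys[n] == ys[0]:
--             n += 1
--         g = n * ys[0]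
--         sums = sums | {u + g for u in sums}
--         ys = ys[n:]
--     return t in sums
-- ===== Notes on version B (the rewrite author's own statement) =====
-- stated objective: alternative
-- what changed: replaces the exponential skip/take recursion over clumps by a single left-to-right pass that run-length-encodes the suffix and maintains the set of all reachable subset sums, answering by one membership test
-- outside the precondition, e.g. on groupSumClump(-1, [1], 1): A returns False, B returns True
import Mathlib
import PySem

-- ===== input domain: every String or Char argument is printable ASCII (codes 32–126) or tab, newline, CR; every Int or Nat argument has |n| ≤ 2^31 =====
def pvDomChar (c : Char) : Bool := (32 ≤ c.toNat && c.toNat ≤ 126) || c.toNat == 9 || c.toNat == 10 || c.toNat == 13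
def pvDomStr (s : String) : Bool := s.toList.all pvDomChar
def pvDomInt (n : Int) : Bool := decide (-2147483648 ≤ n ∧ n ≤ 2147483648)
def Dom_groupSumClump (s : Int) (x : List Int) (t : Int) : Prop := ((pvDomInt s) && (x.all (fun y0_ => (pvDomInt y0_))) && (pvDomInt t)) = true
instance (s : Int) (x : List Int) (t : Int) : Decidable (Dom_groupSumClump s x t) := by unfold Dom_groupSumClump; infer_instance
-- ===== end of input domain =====

-- B replaces A's skip/take recursion over clumps by one pass that run-length-encodes the
-- suffix and maintains the set of reachable subset sums, answering by a membership test.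

-- ===== PORT A =====
-- the inner 'while s+n<len(x) and x[s]==x[s+n]: n+=1' loop
def clumpA (x : List Int) (s : Int) (n : Int) : Int :=
  if h : s + n < (x.length : Int) ∧ PySem.List.pyGet? x s = PySem.List.pyGet? x (s + n) then
    clumpA x s (n + 1)
  else n
termination_by ((x.length : Int) - (s + n)).toNat
decreasing_by omega

-- the recursion, with fuel only to make it total where the Python recurses without bound
-- (s > len(x), excluded by Pre_); inside Pre_ the fuel is never exhausted
def goA (fuel : Nat) (s : Int) (x : List Int) (t : Int) : Bool :=
  match fuel with
  | 0 => false
  | f + 1 =>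
    if t = 0 then true
    else if s = (x.length : Int) then false
    else
      let n := clumpA x s 1
      goA f (s + n) x t || goA f (s + n) x (t - n * ((PySem.List.pyGet? x s).getD 0))

def groupSumClump (s : Int) (x : List Int) (t : Int) : Bool :=
  goA (2 * x.length + 2) s x t

-- ===== PORT B =====
-- inner 'while n < len(ys) and ys[n] == ys[0]: n += 1'
def runB (ys : List Int) (v : Int) (n : Nat) : Nat :=
  if h : n < ys.length then
    if ys[n] = v then runB ys v (n + 1) else n
  else n
termination_by ys.length - n

theorem runB_ge (ys : List Int) (v : Int) (n : Nat) : n ≤ runB ys v n := by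
  unfold runB
  split
  · split
    · have := runB_ge ys v (n + 1); omega
    · exact le_refl n
  · exact le_refl n
termination_by ys.length - n

-- outer 'while ys: … sums = sums | {u+g for u in sums}; ys = ys[n:]'
def sumsLoopB (sums : PySem.Set Int) (ys : List Int) : PySem.Set Int :=
  match hys : ys with
  | [] => sums
  | v :: rest =>
    let n := runB ys v 1
    let g := (n : Int) * v
    sumsLoopB (PySem.Set.union sums (sums.map (· + g))) (ys.drop n)
termination_by ys.length
decreasing_by
  subst hys
  have h1 : 1 ≤ runB (v :: rest) v 1 := runB_ge _ _ _
  simp [List.length_drop]; omega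

def groupSumClump_alt (s : Int) (x : List Int) (t : Int) : Bool :=
  let sums : PySem.Set Int := PySem.Set.ofList [0]
  let ys := PySem.List.slice x (some s) none
  PySem.Set.contains (sumsLoopB sums ys) t

-- ===== PRECONDITION & SPEC =====
-- Pre_ restricts to the natural domain of start indices, 0 ≤ s ≤ len(x) (plus t = 0, where A
-- returns True unconditionally): outside it A either raises (s > len(x): RecursionError,
-- s < -len(x): IndexError) or, for -len(x) ≤ s < 0, returns values produced by negative-index
-- wraparound scanning a clump across the wrapped boundary — an accident of Python indexing
-- outside the function's intended use.
def Pre_groupSumClump (s : Int) (x : List Int) (t : Int) : Prop :=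
  t = 0 ∨ (0 ≤ s ∧ s ≤ (x.length : Int))
instance (s : Int) (x : List Int) (t : Int) : Decidable (Pre_groupSumClump s x t) := by
  unfold Pre_groupSumClump; infer_instance

def pvWitness_groupSumClump : Int × List Int × Int := (0, [1, 1, 2], 3)

def Spec_groupSumClump (s : Int) (x : List Int) (t : Int) (out : Bool) : Prop := out = groupSumClump_alt s x t
instance (s : Int) (x : List Int) (t : Int) (out : Bool) : Decidable (Spec_groupSumClump s x t out) := by unfold Spec_groupSumClump; infer_instance

-- ===== CLAIM (what is proved, stated in full; the proofs are below) =====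
def Claim_equal_groupSumClump : Prop := ∀ (s : Int) (x : List Int) (t : Int), Dom_groupSumClump s x t → Pre_groupSumClump s x t → Spec_groupSumClump s x t (groupSumClump s x t)

-- ===== LEMMAS AND PROOFS =====

-- leading-run count of v
def rc (v : Int) : List Int → Nat
  | [] => 0
  | y :: ys => if y = v then rc v ys + 1 else 0

-- clump sums of a list
def clumps : List Int → List Int
  | [] => []
  | v :: ys => ((rc v ys + 1 : Nat) : Int) * v :: clumps (ys.drop (rc v ys))
termination_by ys => ys.length
decreasing_by simp only [List.length_drop, List.length_cons]; omega

theorem clumps_nil : clumps [] = [] := by rw [clumps]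

theorem clumps_cons (v : Int) (rest : List Int) :
    clumps (v :: rest)
      = ((rc v rest + 1 : Nat) : Int) * v :: clumps (rest.drop (rc v rest)) := by
  rw [clumps]

-- reference subset-sum decision over the clump list
def ssB : List Int → Int → Bool
  | [], t => decide (t = 0)
  | g :: gs, t => ssB gs t || ssB gs (t - g)

theorem ssB_zero (gs : List Int) : ssB gs 0 = true := by
  induction gs with
  | nil => simp [ssB]
  | cons g gs ih => simp [ssB, ih]

theorem rc_le (v : Int) (l : List Int) : rc v l ≤ l.length := by
  induction l with
  | nil => simp [rc]
  | cons y ys ih => simp only [rc]; split <;> simp <;> omega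

theorem clumpA_spec (x : List Int) (i k : Nat) (hi : i < x.length) (hk : 1 ≤ k)
    (hik : i + k ≤ x.length) :
    clumpA x (i : Int) (k : Int) = ((k + rc x[i] (x.drop (i + k)) : Nat) : Int) := by
  rw [clumpA]
  by_cases hlt : i + k < x.length
  · have hd : x.drop (i + k) = x[i + k] :: x.drop (i + k + 1) := List.drop_eq_getElem_cons hlt
    by_cases he : x[i + k] = x[i]
    · have hcast : (i : Int) + (k : Int) = ((i + k : Nat) : Int) := by push_cast; ring
      have hcond : (i : Int) + (k : Int) < (x.length : Int) ∧
          PySem.List.pyGet? x (i : Int) = PySem.List.pyGet? x ((i : Int) + (k : Int)) := by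
        refine ⟨by exact_mod_cast hlt, ?_⟩
        rw [hcast, PySem.List.pyGet?_natCast, PySem.List.pyGet?_natCast,
            List.getElem?_eq_getElem hi, List.getElem?_eq_getElem hlt, he]
      rw [dif_pos hcond]
      have hk1 : (k : Int) + 1 = ((k + 1 : Nat) : Int) := by push_cast; ring
      rw [hk1, clumpA_spec x i (k + 1) hi (by omega) (by omega)]
      have hix : i + (k + 1) = i + k + 1 := by omega
      rw [hix, hd]
      simp only [rc, he, if_pos]
      congr 1
      omega
    · have hcond : ¬ ((i : Int) + (k : Int) < (x.length : Int) ∧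
          PySem.List.pyGet? x (i : Int) = PySem.List.pyGet? x ((i : Int) + (k : Int))) := by
        rintro ⟨-, hq⟩
        have hcast : (i : Int) + (k : Int) = ((i + k : Nat) : Int) := by push_cast; ring
        rw [hcast, PySem.List.pyGet?_natCast, PySem.List.pyGet?_natCast,
            List.getElem?_eq_getElem hi, List.getElem?_eq_getElem hlt] at hq
        exact he (by injection hq with h; exact h.symm)
      rw [dif_neg hcond, hd]
      simp [rc, he]
  · have hcond : ¬ ((i : Int) + (k : Int) < (x.length : Int) ∧
        PySem.List.pyGet? x (i : Int) = PySem.List.pyGet? x ((i : Int) + (k : Int))) := by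
      rintro ⟨hq, -⟩
      have : i + k < x.length := by exact_mod_cast hq
      omega
    have hik' : i + k = x.length := by omega
    rw [dif_neg hcond, hik', List.drop_length]
    simp [rc]
termination_by x.length - (i + k)

theorem goA_spec (x : List Int) (fuel : Nat) : ∀ (i : Nat) (t : Int), i ≤ x.length →
    x.length - i < fuel → goA fuel (i : Int) x t = ssB (clumps (x.drop i)) t := by
  induction fuel with
  | zero => intro i t hi hf; omega
  | succ f ih =>
    intro i t hi hf
    rw [goA]
    by_cases ht : t = 0
    · subst ht; simp [ssB_zero]
    · rw [if_neg ht]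
      by_cases hend : i = x.length
      · subst hend
        simp [List.drop_length, clumps_nil, ssB, ht]
      · have hilt : i < x.length := by omega
        have hne : ¬ ((i : Int) = (x.length : Int)) := by exact_mod_cast hend
        rw [if_neg hne]
        have hcl : clumpA x (i : Int) 1
            = ((rc x[i] (x.drop (i + 1)) + 1 : Nat) : Int) := by
          have h := clumpA_spec x i 1 hilt (le_refl 1) (by omega)
          have hnm : 1 + rc x[i] (x.drop (i + 1)) = rc x[i] (x.drop (i + 1)) + 1 := by omega
          rw [hnm] at h
          simpa using h
        have hm := rc_le x[i] (x.drop (i + 1))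
        simp only [List.length_drop] at hm
        have hc : (i : Int) + ((rc x[i] (x.drop (i + 1)) + 1 : Nat) : Int)
            = (((i + 1 + rc x[i] (x.drop (i + 1))) : Nat) : Int) := by push_cast; ring
        have hd1 : x.drop i = x[i] :: x.drop (i + 1) := List.drop_eq_getElem_cons hilt
        have hcs : clumps (x.drop i)
            = ((rc x[i] (x.drop (i + 1)) + 1 : Nat) : Int) * x[i]
              :: clumps (x.drop (i + 1 + rc x[i] (x.drop (i + 1)))) := by
          rw [hd1, clumps_cons, List.drop_drop]

        have hget : (PySem.List.pyGet? x (i : Int)).getD 0 = x[i] := by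
          rw [PySem.List.pyGet?_natCast, List.getElem?_eq_getElem hilt]; rfl
        simp only [hcl, hget, hc]
        rw [ih (i + 1 + rc x[i] (x.drop (i + 1))) t (by omega) (by omega),
            ih (i + 1 + rc x[i] (x.drop (i + 1))) _ (by omega) (by omega),
            hcs, ssB]

theorem runB_spec (ys : List Int) (v : Int) (n : Nat) (hn : n ≤ ys.length) :
    runB ys v n = n + rc v (ys.drop n) := by
  rw [runB]
  by_cases h : n < ys.length
  · rw [dif_pos h]
    have hd : ys.drop n = ys[n] :: ys.drop (n + 1) := List.drop_eq_getElem_cons h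
    by_cases he : ys[n] = v
    · rw [if_pos he, runB_spec ys v (n + 1) (by omega), hd]
      simp only [rc, he, if_pos]
      omega
    · rw [if_neg he, hd]
      simp [rc, he]
  · rw [dif_neg h]
    have : n = ys.length := by omega
    simp [this, List.drop_length, rc]
termination_by ys.length - n

theorem sumsLoopB_spec (ys : List Int) (S : PySem.Set Int) (t : Int) :
    (t ∈ sumsLoopB S ys) ↔ ∃ u ∈ S, ssB (clumps ys) (t - u) = true := by
  match ys with
  | [] =>
    rw [sumsLoopB]
    simp only [clumps_nil, ssB, decide_eq_true_eq]
    constructor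
    · intro h; exact ⟨t, h, by omega⟩
    · rintro ⟨u, hu, h⟩; have : u = t := by omega
      rwa [this] at hu
  | v :: rest =>
    rw [sumsLoopB]
    have hrun : runB (v :: rest) v 1 = 1 + rc v rest := by
      have := runB_spec (v :: rest) v 1 (by simp)
      simpa using this
    have hdrop : (v :: rest).drop (runB (v :: rest) v 1) = rest.drop (rc v rest) := by
      rw [hrun, Nat.add_comm, List.drop_succ_cons]
    rw [hdrop, sumsLoopB_spec (rest.drop (rc v rest)) _ t]
    rw [clumps_cons]
    simp only [ssB, PySem.Set.mem_union, List.mem_map, Bool.or_eq_true, hrun]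
    constructor
    · rintro ⟨u, hu | ⟨w, hw, rfl⟩, h⟩
      · exact ⟨u, hu, Or.inl h⟩
      · refine ⟨w, hw, Or.inr ?_⟩
        have harg : t - (w + ((1 + rc v rest : Nat) : Int) * v)
            = t - w - ((rc v rest + 1 : Nat) : Int) * v := by push_cast; ring
        rwa [harg] at h
    · rintro ⟨u, hu, h | h⟩
      · exact ⟨u, Or.inl hu, h⟩
      · refine ⟨u + ((1 + rc v rest : Nat) : Int) * v, Or.inr ⟨u, hu, rfl⟩, ?_⟩
        have harg : t - (u + ((1 + rc v rest : Nat) : Int) * v)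
            = t - u - ((rc v rest + 1 : Nat) : Int) * v := by push_cast; ring
        rwa [harg]
termination_by ys.length
decreasing_by simp only [List.length_drop, List.length_cons]; omega

-- ===== VERDICT (by name: the statement is the Claim_ definition above) =====
theorem groupSumClump_spec : Claim_equal_groupSumClump := by
  intro s x t _ hpre
  unfold Spec_groupSumClump groupSumClump groupSumClump_alt
  rw [Bool.eq_iff_iff, PySem.Set.contains_iff, sumsLoopB_spec]
  rcases hpre with ht | ⟨h0, hle⟩
  · subst ht
    have hA : goA (2 * x.length + 2) s x 0 = true := by
      show goA (2 * x.length + 1 + 1) s x 0 = true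
      rw [goA]
      simp
    rw [hA]
    simp only [true_iff]
    exact ⟨0, by decide, by simpa using ssB_zero _⟩
  · obtain ⟨i, rfl⟩ : ∃ i : Nat, (i : Int) = s := ⟨s.toNat, Int.toNat_of_nonneg h0⟩
    have hi : i ≤ x.length := by exact_mod_cast hle
    rw [goA_spec x (2 * x.length + 2) i t hi (by omega),
        PySem.List.slice_from_natCast]
    constructor
    · intro h; exact ⟨0, by simp [PySem.Set.ofList], by simpa using h⟩
    · rintro ⟨u, hu, h⟩
      have : u = 0 := by simpa [PySem.Set.ofList] using hu
      subst this; simpa using h
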